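-- pv_equiv track=rewrite | github.com/noritakaIzumi/atcoder-python | abc192/b/main.py | is_unreadable_string
-- ===== SOURCE A (Python) =====
-- def is_unreadable_string(s: str) -> bool:
--     char: str
--     for i, char in enumerate(s):
--         index_is_odd = i & 1
--         if not index_is_odd and char.islower():
--             continue
--         if index_is_odd and char.isupper():
--             continue
--         return False
--     else:
--         return True
-- ===== SOURCE B (Python) =====
-- def is_unreadable_string(s: str) -> bool:
--     return all(c.islower() for c in s[::2]) and all(c.isupper() for c in s[1::2])
-- ===== Notes on version B (the rewrite author's own statement) =====
-- stated objective: simpler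
-- what changed: Replaces the interleaved index-parity loop with early return by two separate strided passes: all even-position chars lowercase and all odd-position chars uppercase, via s[::2] and s[1::2].
import Mathlib
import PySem

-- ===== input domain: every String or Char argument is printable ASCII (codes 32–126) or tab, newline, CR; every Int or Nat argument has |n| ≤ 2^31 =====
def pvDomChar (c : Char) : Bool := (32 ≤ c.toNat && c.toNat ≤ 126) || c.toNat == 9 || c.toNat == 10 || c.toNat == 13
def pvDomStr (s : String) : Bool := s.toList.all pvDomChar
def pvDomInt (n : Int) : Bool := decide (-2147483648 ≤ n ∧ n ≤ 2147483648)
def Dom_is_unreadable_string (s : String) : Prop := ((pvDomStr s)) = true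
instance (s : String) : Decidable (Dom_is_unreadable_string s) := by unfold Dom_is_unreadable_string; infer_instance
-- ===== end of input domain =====

-- B replaces A's single interleaved parity-branching loop with early return by two separate strided passes (all of s[::2] lowercase and all of s[1::2] uppercase): simpler.

-- ===== PORT A =====
-- the for-loop over enumerate(s) with 'continue' on the two good cases, early 'return False', else 'return True'
def isUnreadableLoop (xs : List Char) (i : Nat) : Bool :=
  match xs with
  | [] => true
  | c :: rest =>
    let indexIsOdd := i &&& 1
    if indexIsOdd == 0 && PySem.Chars.islower c then isUnreadableLoop rest (i + 1)
    else if indexIsOdd != 0 && PySem.Chars.isupper c then isUnreadableLoop rest (i + 1)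
    else false

def is_unreadable_string (s : String) : Bool := isUnreadableLoop s.toList 0

-- ===== PORT B =====
-- all(c.islower() for c in s[::2]) and all(c.isupper() for c in s[1::2])
def is_unreadable_string_alt (s : String) : Bool :=
  ((PySem.List.slice? s.toList none none 2).getD []).all PySem.Chars.islower &&
  ((PySem.List.slice? s.toList (some 1) none 2).getD []).all PySem.Chars.isupper

-- ===== PRECONDITION & SPEC =====
def Spec_is_unreadable_string (s : String) (out : Bool) : Prop := out = is_unreadable_string_alt s
instance (s : String) (out : Bool) : Decidable (Spec_is_unreadable_string s out) := by unfold Spec_is_unreadable_string; infer_instance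

-- ===== CLAIM (what is proved, stated in full; the proofs are below) =====
def Claim_equal_is_unreadable_string : Prop := ∀ (s : String), Dom_is_unreadable_string s → Spec_is_unreadable_string s (is_unreadable_string s)

-- ===== LEMMAS AND PROOFS =====

/-- the even-position elements of a list -/
def pvEvens {α : Type} : List α → List α
  | [] => []
  | [a] => [a]
  | a :: _ :: t => a :: pvEvens t

theorem pvEvens_nil {α : Type} : pvEvens ([] : List α) = [] := rfl

theorem pvEvens_cons {α : Type} (a : α) (t : List α) :
    pvEvens (a :: t) = a :: pvEvens t.tail := by
  cases t <;> rfl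

theorem filterMap_range_even {α : Type} (xs : List α) :
    (List.range ((xs.length + 1) / 2)).filterMap (fun k => xs[2 * k]?) = pvEvens xs := by
  induction xs using pvEvens.induct with
  | case1 => simp [pvEvens]
  | case2 a => simp [pvEvens, List.range_succ_eq_map]
  | case3 a b t ih =>
    have h2 : ((a :: b :: t).length + 1) / 2 = (t.length + 1) / 2 + 1 := by
      simp; omega
    rw [h2, List.range_succ_eq_map, List.filterMap_cons, List.filterMap_map]
    have hf : ∀ k : Nat, (a :: b :: t)[2 * (k + 1)]? = t[2 * k]? := by
      intro k
      have : 2 * (k + 1) = 2 * k + 1 + 1 := by omega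
      rw [this]; simp
    simp only [Nat.mul_zero, List.getElem?_cons_zero, Function.comp_def, hf]
    rw [ih]; rfl

theorem slice?_step2_even {α : Type} (xs : List α) :
    PySem.List.slice? xs none none 2 = some (pvEvens xs) := by
  rw [← filterMap_range_even]
  simp only [PySem.List.slice?, PySem.List.sliceIndices]
  norm_num
  cases xs with
  | nil => simp
  | cons a t =>
    rw [if_pos (by simp : 0 < (a :: t).length)]
    have hc : ((((a :: t).length : Int) + 2 - 1) / 2).toNat = ((a :: t).length + 1) / 2 := by
      omega
    rw [hc]
    apply List.filterMap_congr
    intro k _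
    congr 1

theorem filterMap_shift_one {α : Type} (a : α) (xs : List α) (m : Nat) :
    (List.range m).filterMap (fun k => (a :: xs)[1 + 2 * k]?) =
    (List.range m).filterMap (fun k => xs[2 * k]?) := by
  apply List.filterMap_congr
  intro k _
  have : 1 + 2 * k = 2 * k + 1 := by omega
  rw [this]; simp

theorem slice?_step2_odd {α : Type} (xs : List α) :
    PySem.List.slice? xs (some 1) none 2 = some (pvEvens xs.tail) := by
  cases xs with
  | nil => rfl
  | cons a t =>
    rw [← filterMap_range_even, ← filterMap_shift_one a]
    simp only [PySem.List.slice?, PySem.List.sliceIndices]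
    norm_num
    have hc : (if 0 < t.length then (((t.length : Int) + 2 - 1) / 2).toNat else 0) =
        (t.length + 1) / 2 := by
      split <;> omega
    rw [hc]
    apply List.filterMap_congr
    intro k _
    congr 1

theorem loop_eq_parity (xs : List Char) (i : Nat) :
    isUnreadableLoop xs i =
      if i % 2 = 0 then
        (pvEvens xs).all PySem.Chars.islower && (pvEvens xs.tail).all PySem.Chars.isupper
      else
        (pvEvens xs).all PySem.Chars.isupper && (pvEvens xs.tail).all PySem.Chars.islower := by
  induction xs generalizing i with
  | nil => simp [isUnreadableLoop, pvEvens_nil]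
  | cons c rest ih =>
    rw [isUnreadableLoop]
    have hodd : (i &&& 1) = i % 2 := Nat.and_one_is_mod i
    by_cases hp : i % 2 = 0
    · simp only [hodd, hp, List.tail_cons, pvEvens_cons, List.all_cons]
      by_cases hl : PySem.Chars.islower c
      · rw [hl]
        simp only [Bool.true_and]
        rw [ih (i + 1), if_neg (by omega : ¬ (i + 1) % 2 = 0)]
        exact Bool.and_comm _ _
      · simp [hl]
    · have h1 : i % 2 = 1 := by omega
      simp only [hodd, h1, List.tail_cons, pvEvens_cons, List.all_cons]
      by_cases hu : PySem.Chars.isupper c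
      · rw [hu]
        simp only [Bool.true_and]
        rw [ih (i + 1), if_pos (by omega : (i + 1) % 2 = 0)]
        simp
        exact Bool.and_comm _ _
      · simp [hu]

-- ===== VERDICT (by name: the statement is the Claim_ definition above) =====
theorem is_unreadable_string_spec : Claim_equal_is_unreadable_string := by
  intro s _
  unfold Spec_is_unreadable_string is_unreadable_string is_unreadable_string_alt
  rw [slice?_step2_even, slice?_step2_odd, loop_eq_parity]
  simp
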